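-- pv_equiv track=rewrite | github.com/ajittgosavii/awswar | architecture_designer_revamped.py | _calculate_waf_scores
-- ===== SOURCE A (Python) =====
-- from typing import Dict, List, Optional, Any
--
-- def _calculate_waf_scores(services: List[str], config: Dict) -> Dict[str, int]:
--     """Calculate WAF pillar scores based on services"""
--     scores = {
--         'operational_excellence': 50,
--         'security': 50,
--         'reliability': 50,
--         'performance': 50,
--         'cost': 70,
--         'sustainability': 60,
--     }
--
--     # Score boosters based on services
--     if 'cloudwatch' in services:
--         scores['operational_excellence'] += 15
--     if 'cloudtrail' in services:
--         scores['operational_excellence'] += 10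
--         scores['security'] += 10
--     if 'config' in services:
--         scores['operational_excellence'] += 10
--
--     if 'waf' in services:
--         scores['security'] += 15
--     if 'shield' in services:
--         scores['security'] += 10
--     if 'kms' in services:
--         scores['security'] += 10
--     if 'guardduty' in services:
--         scores['security'] += 10
--     if 'cognito' in services:
--         scores['security'] += 10
--
--     if 'aurora' in services or 'rds' in services:
--         scores['reliability'] += 15
--     if config.get('scale') in ['large', 'massive']:
--         scores['reliability'] += 10
--
--     if 'elasticache' in services:
--         scores['performance'] += 15
--     if 'cloudfront' in services:
--         scores['performance'] += 15
--
--     if 'lambda' in services: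
--         scores['cost'] += 10
--         scores['sustainability'] += 15
--
--     # Cap at 100
--     return {k: min(v, 100) for k, v in scores.items()}
-- ===== SOURCE B (Python) =====
-- from typing import Dict, List
--
-- # One pass over the services list mapping each service to a "bonus id" (aurora and rds
-- # collapse to the same id 'db', so the set dedups the OR), then apply each fired bonus's
-- # pillar deltas once, and cap.
--
-- _BONUS_EFFECTS = {
--     'cloudwatch':  {'operational_excellence': 15},
--     'cloudtrail':  {'operational_excellence': 10, 'security': 10},
--     'config':      {'operational_excellence': 10},
--     'waf':         {'security': 15},
--     'shield':      {'security': 10},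
--     'kms':         {'security': 10},
--     'guardduty':   {'security': 10},
--     'cognito':     {'security': 10},
--     'db':          {'reliability': 15},
--     'big_scale':   {'reliability': 10},
--     'elasticache': {'performance': 15},
--     'cloudfront':  {'performance': 15},
--     'lambda':      {'cost': 10, 'sustainability': 15},
-- }
--
-- _SERVICE_TO_BONUS = {b: b for b in _BONUS_EFFECTS if b not in ('db', 'big_scale')}
-- _SERVICE_TO_BONUS['aurora'] = 'db'
-- _SERVICE_TO_BONUS['rds'] = 'db'
--
--
-- def _calculate_waf_scores(services: List[str], config: Dict) -> Dict[str, int]: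
--     """Calculate WAF pillar scores based on services"""
--     fired = set()
--     for s in services:
--         if s in _SERVICE_TO_BONUS:
--             fired.add(_SERVICE_TO_BONUS[s])
--     if config.get('scale') in ('large', 'massive'):
--         fired.add('big_scale')
--
--     scores = {
--         'operational_excellence': 50,
--         'security': 50,
--         'reliability': 50,
--         'performance': 50,
--         'cost': 70,
--         'sustainability': 60,
--     }
--     for b in fired:
--         for pillar, d in _BONUS_EFFECTS[b].items():
--             scores[pillar] += d
--     return {k: min(v, 100) for k, v in scores.items()}
-- ===== Notes on version B (the rewrite author's own statement) =====
-- stated objective: alternative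
-- what changed: Instead of A's fixed chain of membership scans over the services list (one scan per rule), B makes one pass over services mapping each to a bonus id via a dict (aurora and rds collapse to one id 'db', so the set dedups the OR), unions in a 'big_scale' id from config, then applies each fired bonus's pillar deltas from a data table and caps.
import Mathlib
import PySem

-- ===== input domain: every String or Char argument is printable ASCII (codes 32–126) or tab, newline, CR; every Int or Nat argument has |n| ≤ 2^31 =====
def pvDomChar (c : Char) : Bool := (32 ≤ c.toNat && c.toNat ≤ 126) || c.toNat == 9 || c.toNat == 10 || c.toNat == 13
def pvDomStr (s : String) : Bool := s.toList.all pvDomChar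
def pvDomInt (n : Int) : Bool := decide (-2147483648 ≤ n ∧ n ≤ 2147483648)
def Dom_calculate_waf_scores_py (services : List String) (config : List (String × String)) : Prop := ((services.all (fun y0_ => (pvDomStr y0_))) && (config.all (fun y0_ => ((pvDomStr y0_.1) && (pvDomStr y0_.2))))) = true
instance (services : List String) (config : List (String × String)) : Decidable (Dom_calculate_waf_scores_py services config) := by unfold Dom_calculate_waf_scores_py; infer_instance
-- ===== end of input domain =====

-- B replaces A's fixed chain of membership tests with one pass over the services list
-- mapping each service to a bonus id (aurora/rds collapse to one id, dedup by a set),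
-- then applies each fired bonus's pillar deltas from a table; objective: alternative.

-- ===== PORT A =====
-- A's `scores` dict has six fixed literal keys; the port carries them as six named cells,
-- each `scores[k] += d` statement becoming a rebinding of that cell, in A's statement order,
-- and the final comprehension producing the items in dict insertion order.
def calculate_waf_scores_py (services : List String) (config : List (String × String)) : List (String × Int) :=
  let oe : Int := 50
  let sec : Int := 50
  let rel : Int := 50
  let perf : Int := 50
  let cost : Int := 70
  let sus : Int := 60
  let oe := if services.contains "cloudwatch" then oe + 15 else oe
  let oe := if services.contains "cloudtrail" then oe + 10 else oe
  let sec := if services.contains "cloudtrail" then sec + 10 else sec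
  let oe := if services.contains "config" then oe + 10 else oe
  let sec := if services.contains "waf" then sec + 15 else sec
  let sec := if services.contains "shield" then sec + 10 else sec
  let sec := if services.contains "kms" then sec + 10 else sec
  let sec := if services.contains "guardduty" then sec + 10 else sec
  let sec := if services.contains "cognito" then sec + 10 else sec
  let rel := if services.contains "aurora" || services.contains "rds" then rel + 15 else rel
  let rel := if (PySem.Dict.get? (PySem.Dict.mk config) "scale" == some "large")
              || (PySem.Dict.get? (PySem.Dict.mk config) "scale" == some "massive") then rel + 10 else rel
  let perf := if services.contains "elasticache" then perf + 15 else perf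
  let perf := if services.contains "cloudfront" then perf + 15 else perf
  let cost := if services.contains "lambda" then cost + 10 else cost
  let sus := if services.contains "lambda" then sus + 15 else sus
  [("operational_excellence", min oe 100), ("security", min sec 100), ("reliability", min rel 100),
   ("performance", min perf 100), ("cost", min cost 100), ("sustainability", min sus 100)]

-- ===== PORT B =====
-- _BONUS_EFFECTS: bonus id -> pillar deltas
def pvBonusEffects : PySem.Dict String (PySem.Dict String Int) := PySem.Dict.mk
  [("cloudwatch",  PySem.Dict.mk [("operational_excellence", 15)]),
   ("cloudtrail",  PySem.Dict.mk [("operational_excellence", 10), ("security", 10)]),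
   ("config",      PySem.Dict.mk [("operational_excellence", 10)]),
   ("waf",         PySem.Dict.mk [("security", 15)]),
   ("shield",      PySem.Dict.mk [("security", 10)]),
   ("kms",         PySem.Dict.mk [("security", 10)]),
   ("guardduty",   PySem.Dict.mk [("security", 10)]),
   ("cognito",     PySem.Dict.mk [("security", 10)]),
   ("db",          PySem.Dict.mk [("reliability", 15)]),
   ("big_scale",   PySem.Dict.mk [("reliability", 10)]),
   ("elasticache", PySem.Dict.mk [("performance", 15)]),
   ("cloudfront",  PySem.Dict.mk [("performance", 15)]),
   ("lambda",      PySem.Dict.mk [("cost", 10), ("sustainability", 15)])]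

-- _SERVICE_TO_BONUS (the comprehension's result, written out; aurora/rds map to 'db')
def pvServiceToBonus : PySem.Dict String String := PySem.Dict.mk
  [("cloudwatch", "cloudwatch"), ("cloudtrail", "cloudtrail"), ("config", "config"),
   ("waf", "waf"), ("shield", "shield"), ("kms", "kms"), ("guardduty", "guardduty"),
   ("cognito", "cognito"), ("elasticache", "elasticache"), ("cloudfront", "cloudfront"),
   ("lambda", "lambda"), ("aurora", "db"), ("rds", "db")]

-- inner loop 'for pillar, d in _BONUS_EFFECTS[b].items(): scores[pillar] += d';
-- `_BONUS_EFFECTS[b]` / `scores[pillar]` can never miss a key (fired ⊆ bonus ids, pillars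
-- are the six score keys), so the total getD/modify forms are exact here
def pvApplyBonus (sc : PySem.Dict String Int) (b : String) : PySem.Dict String Int :=
  ((PySem.Dict.getD pvBonusEffects b PySem.Dict.empty).items).foldl
    (fun sc pd => PySem.Dict.modify sc pd.1 0 (fun v => v + pd.2)) sc

def calculate_waf_scores_py_alt (services : List String) (config : List (String × String)) : List (String × Int) :=
  let fired : PySem.Set String := services.foldl (fun f s =>
      match PySem.Dict.get? pvServiceToBonus s with
      | some b => PySem.Set.add f b
      | none => f) PySem.Set.empty
  let fired : PySem.Set String :=
    if (PySem.Dict.get? (PySem.Dict.mk config) "scale" == some "large")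
        || (PySem.Dict.get? (PySem.Dict.mk config) "scale" == some "massive")
    then PySem.Set.add fired "big_scale" else fired
  let scores : PySem.Dict String Int := PySem.Dict.mk
    [("operational_excellence", 50), ("security", 50), ("reliability", 50),
     ("performance", 50), ("cost", 70), ("sustainability", 60)]
  let scores := fired.foldl pvApplyBonus scores
  scores.items.map (fun kv => (kv.1, min kv.2 100))

-- ===== PRECONDITION & SPEC =====
def Spec_calculate_waf_scores_py (services : List String) (config : List (String × String)) (out : List (String × Int)) : Prop := out = calculate_waf_scores_py_alt services config
instance (services : List String) (config : List (String × String)) (out : List (String × Int)) : Decidable (Spec_calculate_waf_scores_py services config out) := by unfold Spec_calculate_waf_scores_py; infer_instance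

-- ===== CLAIM (what is proved, stated in full; the proofs are below) =====
def Claim_equal_calculate_waf_scores_py : Prop := ∀ (services : List String) (config : List (String × String)), Dom_calculate_waf_scores_py services config → Spec_calculate_waf_scores_py services config (calculate_waf_scores_py services config)

-- ===== LEMMAS AND PROOFS =====
def pvBonusIds : List String :=
  ["cloudwatch", "cloudtrail", "config", "waf", "shield", "kms", "guardduty", "cognito",
   "db", "big_scale", "elasticache", "cloudfront", "lambda"]

def pvDelta : String → Int × Int × Int × Int × Int × Int
  | "cloudwatch" => (15, 0, 0, 0, 0, 0)
  | "cloudtrail" => (10, 10, 0, 0, 0, 0)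
  | "config" => (10, 0, 0, 0, 0, 0)
  | "waf" => (0, 15, 0, 0, 0, 0)
  | "shield" => (0, 10, 0, 0, 0, 0)
  | "kms" => (0, 10, 0, 0, 0, 0)
  | "guardduty" => (0, 10, 0, 0, 0, 0)
  | "cognito" => (0, 10, 0, 0, 0, 0)
  | "db" => (0, 0, 15, 0, 0, 0)
  | "big_scale" => (0, 0, 10, 0, 0, 0)
  | "elasticache" => (0, 0, 0, 15, 0, 0)
  | "cloudfront" => (0, 0, 0, 15, 0, 0)
  | "lambda" => (0, 0, 0, 0, 10, 15)
  | _ => (0, 0, 0, 0, 0, 0)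

def mkS (a b c d e f : Int) : PySem.Dict String Int := PySem.Dict.mk
  [("operational_excellence", a), ("security", b), ("reliability", c),
   ("performance", d), ("cost", e), ("sustainability", f)]

theorem mkS_eq_iff (a b c d e f a' b' c' d' e' f' : Int) :
    mkS a b c d e f = mkS a' b' c' d' e' f' ↔
      a = a' ∧ b = b' ∧ c = c' ∧ d = d' ∧ e = e' ∧ f = f' := by
  simp [mkS, PySem.Dict.ext_iff]

theorem applyBonus_eq (x : String) (hx : x ∈ pvBonusIds) (a b c d e f : Int) :
    pvApplyBonus (mkS a b c d e f) x =
      mkS (a + (pvDelta x).1) (b + (pvDelta x).2.1) (c + (pvDelta x).2.2.1)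
          (d + (pvDelta x).2.2.2.1) (e + (pvDelta x).2.2.2.2.1) (f + (pvDelta x).2.2.2.2.2) := by
  fin_cases hx <;>
    (refine Eq.trans (by rfl) ((mkS_eq_iff _ _ _ _ _ _ _ _ _ _ _ _).mpr ?_)) <;>
    (simp [pvDelta, mkS, PySem.Dict.getD, PySem.Dict.get?, PySem.Dict.modify, PySem.Dict.insert, PySem.Dict.contains, List.find?])

theorem fold_applyBonus (l : List String) (hsub : ∀ x ∈ l, x ∈ pvBonusIds) (a b c d e f : Int) :
    l.foldl pvApplyBonus (mkS a b c d e f) =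
      mkS (a + (l.map (fun x => (pvDelta x).1)).sum)
          (b + (l.map (fun x => (pvDelta x).2.1)).sum)
          (c + (l.map (fun x => (pvDelta x).2.2.1)).sum)
          (d + (l.map (fun x => (pvDelta x).2.2.2.1)).sum)
          (e + (l.map (fun x => (pvDelta x).2.2.2.2.1)).sum)
          (f + (l.map (fun x => (pvDelta x).2.2.2.2.2)).sum) := by
  induction l generalizing a b c d e f with
  | nil => simp
  | cons x t ih =>
      simp only [List.foldl_cons, List.map_cons, List.sum_cons]
      rw [applyBonus_eq x (hsub x (by simp)) a b c d e f,
          ih (fun y hy => hsub y (by simp [hy]))]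
      rw [mkS_eq_iff]
      refine ⟨by ring, by ring, by ring, by ring, by ring, by ring⟩

theorem fold_match_eq_filterMap (g : String → Option String) (svcs : List String) (f0 : PySem.Set String) :
    svcs.foldl (fun f s => match g s with | some b => PySem.Set.add f b | none => f) f0
      = (svcs.filterMap g).foldl PySem.Set.add f0 := by
  induction svcs generalizing f0 with
  | nil => rfl
  | cons s t ih =>
      simp only [List.foldl_cons, List.filterMap_cons]
      cases h : g s <;> simp [ih]

theorem sum_ite_eq_sum_filter {α : Type} (p : α → Prop) [DecidablePred p] (f : α → Int) (ids : List α) :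
    (ids.map (fun x => if p x then f x else 0)).sum = ((ids.filter (fun x => decide (p x))).map f).sum := by
  induction ids with
  | nil => rfl
  | cons a t ih => by_cases h : p a <;> simp [h, ih]

theorem sum_map_of_nodup_subset {α : Type} [DecidableEq α] (l ids : List α) (f : α → Int)
    (hn : l.Nodup) (hid : ids.Nodup) (hsub : ∀ x ∈ l, x ∈ ids) :
    (l.map f).sum = (ids.map (fun x => if x ∈ l then f x else 0)).sum := by
  have hperm : l.Perm (ids.filter (fun x => decide (x ∈ l))) := by
    rw [List.perm_ext_iff_of_nodup hn (hid.filter _)]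
    intro a; simp only [List.mem_filter, decide_eq_true_eq]
    exact ⟨fun h => ⟨hsub a h, h⟩, fun h => h.2⟩
  rw [sum_ite_eq_sum_filter, (hperm.map f).sum_eq]

theorem get?_mk_eq_some_iff {κ ν : Type} [BEq κ] [LawfulBEq κ] (l : List (κ × ν))
    (hn : (l.map Prod.fst).Nodup) (k : κ) (v : ν) :
    PySem.Dict.get? (PySem.Dict.mk l) k = some v ↔ (k, v) ∈ l := by
  constructor
  · intro h
    simp only [PySem.Dict.get?, Option.map_eq_some_iff] at h
    obtain ⟨p, hf, hv⟩ := h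
    have hm := List.mem_of_find?_eq_some hf
    have hp : p.1 = k := by have := List.find?_some hf; simpa using this
    have : p = (k, v) := by cases p; simp_all
    simpa [this] using hm
  · intro h
    have hex : (List.find? (fun p => p.1 == k) l).isSome := by
      exact List.find?_isSome.mpr ⟨(k, v), h, by simp⟩
    obtain ⟨p, hf⟩ := Option.isSome_iff_exists.mp hex
    have hm := List.mem_of_find?_eq_some hf
    have hp : p.1 = k := by have := List.find?_some hf; simpa using this
    have hpv : p = (k, v) := List.inj_on_of_nodup_map hn hm h (by simpa using hp)
    simp only [PySem.Dict.get?]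
    rw [hf]; simp [hpv]

theorem pv_core (services : List String) (sb : Bool) (l : List String)
    (hnodup : l.Nodup)
    (hmem : ∀ y : String, y ∈ l ↔
      ((∃ s ∈ services, PySem.Dict.get? pvServiceToBonus s = some y) ∨ (sb = true ∧ y = "big_scale"))) :
    (let oe : Int := 50
     let sec : Int := 50
     let rel : Int := 50
     let perf : Int := 50
     let cost : Int := 70
     let sus : Int := 60
     let oe := if services.contains "cloudwatch" then oe + 15 else oe
     let oe := if services.contains "cloudtrail" then oe + 10 else oe
     let sec := if services.contains "cloudtrail" then sec + 10 else sec
     let oe := if services.contains "config" then oe + 10 else oe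
     let sec := if services.contains "waf" then sec + 15 else sec
     let sec := if services.contains "shield" then sec + 10 else sec
     let sec := if services.contains "kms" then sec + 10 else sec
     let sec := if services.contains "guardduty" then sec + 10 else sec
     let sec := if services.contains "cognito" then sec + 10 else sec
     let rel := if services.contains "aurora" || services.contains "rds" then rel + 15 else rel
     let rel := if sb then rel + 10 else rel
     let perf := if services.contains "elasticache" then perf + 15 else perf
     let perf := if services.contains "cloudfront" then perf + 15 else perf
     let cost := if services.contains "lambda" then cost + 10 else cost
     let sus := if services.contains "lambda" then sus + 15 else sus
     [("operational_excellence", min oe 100), ("security", min sec 100), ("reliability", min rel 100),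
      ("performance", min perf 100), ("cost", min cost 100), ("sustainability", min sus 100)])
    = (l.foldl pvApplyBonus (PySem.Dict.mk
        [("operational_excellence", (50:Int)), ("security", 50), ("reliability", 50),
         ("performance", 50), ("cost", 70), ("sustainability", 60)])).items.map
        (fun kv => (kv.1, min kv.2 100)) := by
  have hkeys : (([("cloudwatch", "cloudwatch"), ("cloudtrail", "cloudtrail"), ("config", "config"),
      ("waf", "waf"), ("shield", "shield"), ("kms", "kms"), ("guardduty", "guardduty"),
      ("cognito", "cognito"), ("elasticache", "elasticache"), ("cloudfront", "cloudfront"),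
      ("lambda", "lambda"), ("aurora", "db"), ("rds", "db")] : List (String × String)).map Prod.fst).Nodup := by decide
  have hmem' : ∀ y : String, y ∈ l ↔
      ((∃ s ∈ services, (s, y) ∈ ([("cloudwatch", "cloudwatch"), ("cloudtrail", "cloudtrail"), ("config", "config"),
        ("waf", "waf"), ("shield", "shield"), ("kms", "kms"), ("guardduty", "guardduty"),
        ("cognito", "cognito"), ("elasticache", "elasticache"), ("cloudfront", "cloudfront"),
        ("lambda", "lambda"), ("aurora", "db"), ("rds", "db")] : List (String × String)))
        ∨ (sb = true ∧ y = "big_scale")) := by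
    intro y
    rw [hmem]
    simp only [pvServiceToBonus, get?_mk_eq_some_iff _ hkeys]
  have hsub : ∀ x ∈ l, x ∈ pvBonusIds := by
    intro x hx
    rcases (hmem' x).mp hx with ⟨s, _, hg⟩ | ⟨_, rfl⟩
    · simp only [List.mem_cons, Prod.mk.injEq, List.not_mem_nil, or_false] at hg
      rcases hg with ⟨_,rfl⟩|⟨_,rfl⟩|⟨_,rfl⟩|⟨_,rfl⟩|⟨_,rfl⟩|⟨_,rfl⟩|⟨_,rfl⟩|⟨_,rfl⟩|⟨_,rfl⟩|⟨_,rfl⟩|⟨_,rfl⟩|⟨_,rfl⟩|⟨_,rfl⟩ <;> decide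
    · decide
  have m_cw : ("cloudwatch" ∈ l) ↔ "cloudwatch" ∈ services := by rw [hmem']; simp
  have m_ct : ("cloudtrail" ∈ l) ↔ "cloudtrail" ∈ services := by rw [hmem']; simp
  have m_cf : ("config" ∈ l) ↔ "config" ∈ services := by rw [hmem']; simp
  have m_waf : ("waf" ∈ l) ↔ "waf" ∈ services := by rw [hmem']; simp
  have m_sh : ("shield" ∈ l) ↔ "shield" ∈ services := by rw [hmem']; simp
  have m_kms : ("kms" ∈ l) ↔ "kms" ∈ services := by rw [hmem']; simp
  have m_gd : ("guardduty" ∈ l) ↔ "guardduty" ∈ services := by rw [hmem']; simp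
  have m_cg : ("cognito" ∈ l) ↔ "cognito" ∈ services := by rw [hmem']; simp
  have m_db : ("db" ∈ l) ↔ ("aurora" ∈ services ∨ "rds" ∈ services) := by
    rw [hmem']
    simp only [List.mem_cons, Prod.mk.injEq, List.not_mem_nil, or_false]
    constructor
    · rintro (⟨s, hs, h⟩ | ⟨_, h⟩)
      · rcases h with ⟨rfl,h⟩|⟨rfl,h⟩|⟨rfl,h⟩|⟨rfl,h⟩|⟨rfl,h⟩|⟨rfl,h⟩|⟨rfl,h⟩|⟨rfl,h⟩|⟨rfl,h⟩|⟨rfl,h⟩|⟨rfl,h⟩|⟨rfl,h⟩|⟨rfl,h⟩ <;> simp_all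
      · simp at h
    · rintro (h | h)
      · exact Or.inl ⟨"aurora", h, by simp⟩
      · exact Or.inl ⟨"rds", h, by simp⟩
  have m_bs : ("big_scale" ∈ l) ↔ sb = true := by rw [hmem']; simp
  have m_ec : ("elasticache" ∈ l) ↔ "elasticache" ∈ services := by rw [hmem']; simp
  have m_cfr : ("cloudfront" ∈ l) ↔ "cloudfront" ∈ services := by rw [hmem']; simp
  have m_lam : ("lambda" ∈ l) ↔ "lambda" ∈ services := by rw [hmem']; simp
  rw [show (PySem.Dict.mk
        [("operational_excellence", (50:Int)), ("security", 50), ("reliability", 50),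
         ("performance", 50), ("cost", 70), ("sustainability", 60)]) = mkS 50 50 50 50 70 60 from rfl,
      fold_applyBonus l hsub]
  simp only [mkS, PySem.Dict.items, List.map_cons, List.map_nil]
  simp only [List.cons.injEq, Prod.mk.injEq, true_and, and_true]
  refine ⟨?_, ?_, ?_, ?_, ?_, ?_⟩ <;>
    (rw [sum_map_of_nodup_subset l pvBonusIds _ hnodup (by decide) hsub]
     simp only [pvBonusIds, List.map_cons, List.map_nil, List.sum_cons, List.sum_nil, pvDelta,
                m_cw, m_ct, m_cf, m_waf, m_sh, m_kms, m_gd, m_cg, m_db, m_bs, m_ec, m_cfr, m_lam,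
                List.contains_eq_mem, decide_eq_true_eq, ite_self])
  · by_cases h1 : "cloudwatch" ∈ services <;> by_cases h2 : "cloudtrail" ∈ services <;>
      by_cases h3 : "config" ∈ services <;> simp [h1, h2, h3] <;> norm_num
  · by_cases h1 : "cloudtrail" ∈ services <;> by_cases h2 : "waf" ∈ services <;>
      by_cases h3 : "shield" ∈ services <;> by_cases h4 : "kms" ∈ services <;>
      by_cases h5 : "guardduty" ∈ services <;> by_cases h6 : "cognito" ∈ services <;>
      simp [h1, h2, h3, h4, h5, h6] <;> norm_num
  · by_cases h1 : "aurora" ∈ services <;> by_cases h2 : "rds" ∈ services <;>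
      by_cases h3 : sb = true <;> simp [h1, h2, h3] <;> norm_num
  · by_cases h1 : "elasticache" ∈ services <;> by_cases h2 : "cloudfront" ∈ services <;>
      simp [h1, h2] <;> norm_num
  · by_cases h1 : "lambda" ∈ services <;> simp [h1]
  · by_cases h1 : "lambda" ∈ services <;> simp [h1]

-- ===== VERDICT (by name: the statement is the Claim_ definition above) =====
theorem calculate_waf_scores_py_spec : Claim_equal_calculate_waf_scores_py := by
  intro services config _
  unfold Spec_calculate_waf_scores_py calculate_waf_scores_py calculate_waf_scores_py_alt
  rw [fold_match_eq_filterMap (PySem.Dict.get? pvServiceToBonus) services PySem.Set.empty,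
      show (PySem.Set.empty : PySem.Set String) = [] from rfl,
      ← PySem.Set.ofList_eq_foldl]
  generalize ((PySem.Dict.get? (PySem.Dict.mk config) "scale" == some "large")
      || (PySem.Dict.get? (PySem.Dict.mk config) "scale" == some "massive")) = sb
  have hnodup : (if sb = true
      then PySem.Set.add (PySem.Set.ofList (services.filterMap (PySem.Dict.get? pvServiceToBonus))) "big_scale"
      else PySem.Set.ofList (services.filterMap (PySem.Dict.get? pvServiceToBonus))).Nodup := by
    by_cases hb : sb = true <;> simp only [hb, if_true, if_false, Bool.false_eq_true]
    · exact PySem.Set.nodup_add _ _ (PySem.Set.nodup_ofList _)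
    · exact PySem.Set.nodup_ofList _
  have hmem : ∀ y : String, y ∈ (if sb = true
      then PySem.Set.add (PySem.Set.ofList (services.filterMap (PySem.Dict.get? pvServiceToBonus))) "big_scale"
      else PySem.Set.ofList (services.filterMap (PySem.Dict.get? pvServiceToBonus))) ↔
      ((∃ s ∈ services, PySem.Dict.get? pvServiceToBonus s = some y) ∨ (sb = true ∧ y = "big_scale")) := by
    intro y
    by_cases hb : sb = true <;>
      simp [hb, PySem.Set.mem_add, PySem.Set.mem_ofList, List.mem_filterMap]
  exact pv_core services sb _ hnodup hmem
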